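-- pv_equiv track=rewrite | github.com/s3rvac/advent-of-code | 2024/22/aoc22_part1.py | evolve_secret_number
-- ===== SOURCE A (Python) =====
-- def evolve_secret_number(n, turn_count):
--     def mix(m):
--         return n ^ m
--
--     def prune(m):
--         return m % 16777216
--
--     for _ in range(turn_count):
--         n = prune(mix(n * 64))
--         n = prune(mix(n // 32))
--         n = prune(mix(n * 2048))
--     return n
-- ===== SOURCE B (Python) =====
-- def evolve_secret_number(n, turn_count):
--     # One PRNG turn is a GF(2)-linear map on the 24-bit state: build its
--     # 24-column bit matrix and raise it to turn_count by repeated squaring.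
--     P = 1 << 24
--     if turn_count <= 0:
--         return n
--
--     def step(m):
--         m = (m ^ (m * 64)) % P
--         m = (m ^ (m // 32)) % P
--         m = (m ^ (m * 2048)) % P
--         return m
--
--     def apply(cols, v):
--         r = 0
--         for c in cols:
--             if v & 1:
--                 r ^= c
--             v >>= 1
--         return r
--
--     def mul(A, B):
--         return [apply(A, c) for c in B]
--
--     base = [step(1 << j) for j in range(24)]
--     R = [1 << j for j in range(24)]  # identity matrix
--     e = turn_count
--     while e > 0:
--         if e & 1:
--             R = mul(base, R)
--         base = mul(base, base)
--         e >>= 1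
--     return apply(R, n % P)
-- ===== Notes on version B (the rewrite author's own statement) =====
-- stated objective: faster
-- what changed: One PRNG turn is a GF(2)-linear map on the 24-bit state, so B builds the 24-column bit matrix of one turn and raises it to turn_count by binary exponentiation instead of iterating the turn turn_count times.
import Mathlib
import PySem

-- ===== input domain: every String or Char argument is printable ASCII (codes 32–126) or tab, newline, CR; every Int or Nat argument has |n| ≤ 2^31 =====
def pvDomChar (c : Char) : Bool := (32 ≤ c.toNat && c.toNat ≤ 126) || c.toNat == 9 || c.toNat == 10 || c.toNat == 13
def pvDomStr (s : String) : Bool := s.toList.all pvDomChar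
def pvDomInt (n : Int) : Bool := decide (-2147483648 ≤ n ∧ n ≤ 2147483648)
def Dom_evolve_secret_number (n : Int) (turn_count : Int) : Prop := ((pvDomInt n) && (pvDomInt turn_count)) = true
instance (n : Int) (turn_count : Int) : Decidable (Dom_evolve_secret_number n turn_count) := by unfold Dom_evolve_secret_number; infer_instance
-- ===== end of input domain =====

-- B replaces A's turn-by-turn loop by exponentiation of the one-turn GF(2)-linear
-- map's 24-column bit matrix (objective: faster, measured).

-- ===== PORT A =====
-- A's helpers mix/prune are inlined; mix reads the CURRENT loop variable n at each call.
def evolve_secret_number (n : Int) (turn_count : Int) : Int :=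
  (PySem.List.pyRange 0 turn_count 1).foldl
    (fun n _ =>
      let n1 := PySem.Int.mod (PySem.Int.bxor n (n * 64)) 16777216        -- n = prune(mix(n * 64))
      let n2 := PySem.Int.mod (PySem.Int.bxor n1 (PySem.Int.floordiv n1 32)) 16777216  -- n = prune(mix(n // 32))
      PySem.Int.mod (PySem.Int.bxor n2 (n2 * 2048)) 16777216)             -- n = prune(mix(n * 2048))
    n

-- ===== PORT B =====
-- Source B's step(m); the state is a nonnegative 24-bit number, kept as Nat.
def pvStepN (m : Nat) : Nat :=
  let a := (m ^^^ m * 64) % 16777216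
  let b := (a ^^^ a / 32) % 16777216
  (b ^^^ b * 2048) % 16777216

-- Source B's apply(cols, v): xor of the columns selected by the bits of v (peeling v bit by bit)
def pvApply : List Nat → Nat → Nat
  | [], _ => 0
  | c :: cs, v => if v % 2 = 1 then c ^^^ pvApply cs (v / 2) else pvApply cs (v / 2)

-- Source B's mul(A, B)
def pvMul (A B : List Nat) : List Nat := B.map (pvApply A)

-- Source B's while-loop: (R, base, e) → (updated R, base·base, e >> 1)
def pvPowLoop (base R : List Nat) (e : Nat) : List Nat :=
  if e = 0 then R
  else pvPowLoop (pvMul base base) (if e % 2 = 1 then pvMul base R else R) (e / 2)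
  termination_by e
  decreasing_by exact Nat.div_lt_self (Nat.pos_of_ne_zero (by assumption)) (by norm_num)

def evolve_secret_number_alt (n : Int) (turn_count : Int) : Int :=
  if turn_count ≤ 0 then n
  else
    let base := (List.range 24).map (fun j => pvStepN (1 <<< j))
    let R := (List.range 24).map (fun j => 1 <<< j)
    ((pvApply (pvPowLoop base R turn_count.toNat)
      ((PySem.Int.mod n 16777216).toNat) : Nat) : Int)

-- ===== PRECONDITION & SPEC =====
def Spec_evolve_secret_number (n : Int) (turn_count : Int) (out : Int) : Prop := out = evolve_secret_number_alt n turn_count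
instance (n : Int) (turn_count : Int) (out : Int) : Decidable (Spec_evolve_secret_number n turn_count out) := by unfold Spec_evolve_secret_number; infer_instance

-- ===== CLAIM (what is proved, stated in full; the proofs are below) =====
def Claim_equal_evolve_secret_number : Prop := ∀ (n : Int) (turn_count : Int), Dom_evolve_secret_number n turn_count → Spec_evolve_secret_number n turn_count (evolve_secret_number n turn_count)

-- ===== LEMMAS AND PROOFS =====

-- ---- bit-level Nat lemmas ----
theorem pvXorMod (x y k : Nat) : (x ^^^ y) % 2 ^ k = x % 2 ^ k ^^^ y % 2 ^ k := by
  apply Nat.eq_of_testBit_eq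
  intro i
  simp [Nat.testBit_mod_two_pow, Nat.testBit_xor]
  by_cases h : i < k <;> simp [h]

theorem pvXorDiv (x y k : Nat) : (x ^^^ y) / 2 ^ k = x / 2 ^ k ^^^ y / 2 ^ k := by
  apply Nat.eq_of_testBit_eq
  intro i
  simp [← Nat.shiftRight_eq_div_pow, Nat.testBit_shiftRight, Nat.testBit_xor]

theorem pvXorMul (x y k : Nat) : (x ^^^ y) * 2 ^ k = x * 2 ^ k ^^^ y * 2 ^ k := by
  apply Nat.eq_of_testBit_eq
  intro i
  simp [← Nat.shiftLeft_eq, Nat.testBit_shiftLeft, Nat.testBit_xor]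
  by_cases h : k ≤ i <;> simp [h]

theorem pvXorSplit (x y : Nat) : x ^^^ y = 2 * (x / 2 ^^^ y / 2) + (x % 2 ^^^ y % 2) := by
  have h1 := pvXorDiv x y 1
  have h2 := pvXorMod x y 1
  rw [pow_one] at h1 h2
  omega

theorem pvMaskXor (k m : Nat) (h : m < 2 ^ k) : (2 ^ k - 1) ^^^ m = 2 ^ k - 1 - m := by
  induction k generalizing m with
  | zero => interval_cases m; rfl
  | succ k ih =>
    have hsplit := pvXorSplit (2 ^ (k + 1) - 1) m
    have hp : (2 : Nat) ^ (k + 1) = 2 * 2 ^ k := by ring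
    have hp0 : 0 < (2 : Nat) ^ k := Nat.two_pow_pos k
    have e1 : (2 ^ (k + 1) - 1) / 2 = 2 ^ k - 1 := by omega
    have e2 : (2 ^ (k + 1) - 1) % 2 = 1 := by omega
    have hm : m / 2 < 2 ^ k := by omega
    rw [e1, e2, ih _ hm] at hsplit
    have e3 : (1 ^^^ m % 2) = 1 - m % 2 := by
      rcases Nat.mod_two_eq_zero_or_one m with h' | h' <;> simp [h']
    rw [e3] at hsplit
    omega

theorem pvOneXorTwoMul (m : Nat) : 1 ^^^ 2 * m = 2 * m + 1 := by
  have h := pvXorSplit 1 (2 * m)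
  simpa using h

theorem pvXorAC (a x y : Nat) : (a ^^^ x) ^^^ (a ^^^ y) = x ^^^ y := by
  rw [Nat.xor_assoc, ← Nat.xor_assoc x a y, Nat.xor_comm x a, Nat.xor_assoc a x y,
    ← Nat.xor_assoc, Nat.xor_self, Nat.zero_xor]

theorem pvXorAC2 (a x y : Nat) : a ^^^ (x ^^^ y) = x ^^^ (a ^^^ y) := by
  rw [← Nat.xor_assoc, ← Nat.xor_assoc, Nat.xor_comm a x]

theorem pvP_eq : (16777216 : Nat) = 2 ^ 24 := by norm_num

theorem pvXorModP (x y : Nat) :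
    (x ^^^ y) % 16777216 = x % 16777216 ^^^ y % 16777216 := by
  rw [pvP_eq]; exact pvXorMod x y 24

-- ---- the one-turn map and its GF(2) linearity ----
def pvS1 (m : Nat) : Nat := (m ^^^ m * 64) % 16777216
def pvS2 (m : Nat) : Nat := (m ^^^ m / 32) % 16777216
def pvS3 (m : Nat) : Nat := (m ^^^ m * 2048) % 16777216

theorem pvStepN_eq (m : Nat) : pvStepN m = pvS3 (pvS2 (pvS1 m)) := rfl

theorem pvS1_xor (x y : Nat) : pvS1 (x ^^^ y) = pvS1 x ^^^ pvS1 y := by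
  unfold pvS1
  rw [show (64 : Nat) = 2 ^ 6 by norm_num, pvXorMul x y 6, pvP_eq,
    show (x ^^^ y ^^^ (x * 2 ^ 6 ^^^ y * 2 ^ 6)) = (x ^^^ x * 2 ^ 6) ^^^ (y ^^^ y * 2 ^ 6) by
      rw [Nat.xor_assoc, Nat.xor_assoc]
      congr 1
      exact pvXorAC2 y _ _,
    pvXorMod]

theorem pvS2_xor (x y : Nat) : pvS2 (x ^^^ y) = pvS2 x ^^^ pvS2 y := by
  unfold pvS2
  rw [show (32 : Nat) = 2 ^ 5 by norm_num, pvXorDiv x y 5, pvP_eq,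
    show (x ^^^ y ^^^ (x / 2 ^ 5 ^^^ y / 2 ^ 5)) = (x ^^^ x / 2 ^ 5) ^^^ (y ^^^ y / 2 ^ 5) by
      rw [Nat.xor_assoc, Nat.xor_assoc]
      congr 1
      exact pvXorAC2 y _ _,
    pvXorMod]

theorem pvS3_xor (x y : Nat) : pvS3 (x ^^^ y) = pvS3 x ^^^ pvS3 y := by
  unfold pvS3
  rw [show (2048 : Nat) = 2 ^ 11 by norm_num, pvXorMul x y 11, pvP_eq,
    show (x ^^^ y ^^^ (x * 2 ^ 11 ^^^ y * 2 ^ 11)) = (x ^^^ x * 2 ^ 11) ^^^ (y ^^^ y * 2 ^ 11) by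
      rw [Nat.xor_assoc, Nat.xor_assoc]
      congr 1
      exact pvXorAC2 y _ _,
    pvXorMod]

theorem pvStepN_xor (x y : Nat) : pvStepN (x ^^^ y) = pvStepN x ^^^ pvStepN y := by
  rw [pvStepN_eq, pvStepN_eq, pvStepN_eq, pvS1_xor, pvS2_xor, pvS3_xor]

theorem pvStepN_lt (m : Nat) : pvStepN m < 16777216 :=
  Nat.mod_lt _ (by norm_num)

theorem pvStepN_mod (m : Nat) : pvStepN m = pvStepN (m % 16777216) := by
  have h1 : pvS1 m = pvS1 (m % 16777216) := by
    unfold pvS1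
    conv_lhs => rw [pvP_eq, pvXorMod]
    conv_rhs => rw [pvP_eq, pvXorMod]
    rw [Nat.mod_mod_of_dvd _ dvd_rfl, ← pvP_eq]
    congr 1
    conv_lhs => rw [pvP_eq, ← Nat.mod_mul_mod]
    conv_rhs => rw [pvP_eq, ← Nat.mod_mul_mod]
    rw [Nat.mod_mod_of_dvd _ dvd_rfl]
  rw [pvStepN_eq, pvStepN_eq, h1]

-- ---- pvApply / pvMul / pvPowLoop semantics ----
theorem pvApply_zero (A : List Nat) : pvApply A 0 = 0 := by
  induction A with
  | nil => rfl
  | cons c cs ih => simp [pvApply, ih]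

theorem pvApply_xor (A : List Nat) (x y : Nat) :
    pvApply A (x ^^^ y) = pvApply A x ^^^ pvApply A y := by
  induction A generalizing x y with
  | nil => simp [pvApply]
  | cons c cs ih =>
    have hd : (x ^^^ y) / 2 = x / 2 ^^^ y / 2 := by
      have := pvXorDiv x y 1; rwa [pow_one] at this
    have hm : (x ^^^ y) % 2 = x % 2 ^^^ y % 2 := by
      have := pvXorMod x y 1; rwa [pow_one] at this
    rcases Nat.mod_two_eq_zero_or_one x with hx | hx <;>
      rcases Nat.mod_two_eq_zero_or_one y with hy | hy <;>
      simp [pvApply, hd, hm, hx, hy, ih]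
    · exact pvXorAC2 c _ _
    · exact (Nat.xor_assoc c _ _).symm
    · exact (pvXorAC c _ _).symm

theorem pvApply_mul (A B : List Nat) (v : Nat) :
    pvApply (pvMul A B) v = pvApply A (pvApply B v) := by
  induction B generalizing v with
  | nil => simp [pvApply, pvMul, pvApply_zero]
  | cons c cs ih =>
    simp only [pvMul] at ih ⊢
    by_cases h : v % 2 = 1 <;> simp [pvApply, h, ih, pvApply_xor]

theorem pvApply_cols (k : Nat) (f : Nat → Nat)
    (hf : ∀ x y, f (x ^^^ y) = f x ^^^ f y) (v : Nat) :
    pvApply ((List.range k).map (fun j => f (1 <<< j))) v = f (v % 2 ^ k) := by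
  induction k generalizing f v with
  | zero =>
    have h0 := hf 0 0
    simp at h0
    simp [pvApply, Nat.mod_one, h0]
  | succ k ih =>
    rw [List.range_succ_eq_map]
    have hg : ∀ x y, f (2 * (x ^^^ y)) = f (2 * x) ^^^ f (2 * y) := by
      intro x y
      rw [show 2 * (x ^^^ y) = (x ^^^ y) * 2 ^ 1 by ring, pvXorMul x y 1,
        show x * 2 ^ 1 = 2 * x by ring, show y * 2 ^ 1 = 2 * y by ring, hf]
    have hmap : (List.map Nat.succ (List.range k)).map (fun j => f (1 <<< j))
        = (List.range k).map (fun j => (fun z => f (2 * z)) (1 <<< j)) := by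
      rw [List.map_map]
      apply List.map_congr_left
      intro j _
      simp only [Function.comp_apply, Nat.succ_eq_add_one]
      congr 1
      rw [Nat.shiftLeft_eq, Nat.shiftLeft_eq, pow_succ]
      ring
    have hrec := ih (fun z => f (2 * z)) hg (v / 2)
    simp only at hrec
    have harith : v % 2 ^ (k + 1) = 2 * (v / 2 % 2 ^ k) + v % 2 := by
      have h1 : v % 2 ^ (k + 1) % 2 = v % 2 :=
        Nat.mod_mod_of_dvd v ⟨2 ^ k, by ring⟩
      have h2 : v % 2 ^ (k + 1) / 2 = v / 2 % 2 ^ k := by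
        rw [show (2 : Nat) ^ (k + 1) = 2 * 2 ^ k by ring]
        exact Nat.mod_mul_right_div_self v 2 (2 ^ k)
      omega
    simp only [List.map_cons, pvApply, Nat.shiftLeft_zero, hmap]
    rw [hrec]
    rcases Nat.mod_two_eq_zero_or_one v with hv | hv
    · rw [if_neg (by omega)]
      congr 1
      omega
    · rw [if_pos hv, ← hf, pvOneXorTwoMul]
      congr 1
      omega

theorem pvPow_sem (e : Nat) : ∀ (base R : List Nat) (v : Nat),
    pvApply (pvPowLoop base R e) v = (pvApply base)^[e] (pvApply R v) := by
  induction e using Nat.strong_induction_on with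
  | _ e ih =>
    intro base R v
    rw [pvPowLoop]
    by_cases he : e = 0
    · simp [he]
    · rw [if_neg he]
      have hlt : e / 2 < e := Nat.div_lt_self (Nat.pos_of_ne_zero he) (by norm_num)
      rw [ih (e / 2) hlt]
      have hbb : pvApply (pvMul base base) = pvApply base ∘ pvApply base :=
        funext fun w => pvApply_mul base base w
      have h2 : (pvApply base ∘ pvApply base)^[e / 2] = (pvApply base)^[2 * (e / 2)] := by
        rw [Function.iterate_mul]
        rfl
      rw [hbb, h2]
      rcases Nat.mod_two_eq_zero_or_one e with hp | hp
      · have hR : (if e % 2 = 1 then pvMul base R else R) = R := if_neg (by omega)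
        rw [hR, show 2 * (e / 2) = e by omega]
      · have hR : (if e % 2 = 1 then pvMul base R else R) = pvMul base R := if_pos hp
        rw [hR, pvApply_mul, ← Function.iterate_succ_apply]
        congr 1
        omega

theorem pvIterAgree (k : Nat) : ∀ v : Nat, v < 16777216 →
    (fun w => pvStepN (w % 2 ^ 24))^[k] v = pvStepN^[k] v := by
  induction k with
  | zero => intro v _; rfl
  | succ k ih =>
    intro v hv
    rw [Function.iterate_succ_apply, Function.iterate_succ_apply]
    have h : pvStepN (v % 2 ^ 24) = pvStepN v := by
      rw [← pvP_eq, ← pvStepN_mod]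
    rw [h]
    exact ih _ (pvStepN_lt v)

-- B's whole computation on a 24-bit state equals k iterations of the one-turn map
theorem pvAlt_sem (k v : Nat) (hv : v < 16777216) :
    pvApply (pvPowLoop ((List.range 24).map (fun j => pvStepN (1 <<< j)))
      ((List.range 24).map (fun j => 1 <<< j)) k) v = pvStepN^[k] v := by
  rw [pvPow_sem]
  have hI : pvApply ((List.range 24).map (fun j => 1 <<< j)) v = v := by
    have h := pvApply_cols 24 id (fun _ _ => rfl) v
    simp only [id] at h
    rw [h, Nat.mod_eq_of_lt (by rw [← pvP_eq]; exact hv)]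
  have hM : pvApply ((List.range 24).map (fun j => pvStepN (1 <<< j)))
      = fun w => pvStepN (w % 2 ^ 24) :=
    funext fun w => pvApply_cols 24 pvStepN pvStepN_xor w
  rw [hI, hM]
  exact pvIterAgree k v hv

-- ---- the Int side: A's loop body in terms of pvStepN ----
def pvStepI (n : Int) : Int :=
  let n1 := PySem.Int.mod (PySem.Int.bxor n (n * 64)) 16777216
  let n2 := PySem.Int.mod (PySem.Int.bxor n1 (PySem.Int.floordiv n1 32)) 16777216
  PySem.Int.mod (PySem.Int.bxor n2 (n2 * 2048)) 16777216

theorem pvModEmod (a : Int) : PySem.Int.mod a 16777216 = a % 16777216 :=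
  PySem.Int.mod_eq_emod_of_pos (by norm_num)

theorem pvMaskEq (w : Nat) :
    16777216 - 1 - w % 16777216 = (16777216 - 1) ^^^ w % 16777216 := by
  rw [pvP_eq]
  exact (pvMaskXor 24 _ (Nat.mod_lt _ (by norm_num))).symm

theorem pvNegEmod (w : Nat) :
    (-((w : Int) + 1)) % 16777216 = ((16777216 - 1 - w % 16777216 : Nat) : Int) := by
  have hr : w % 16777216 < 16777216 := Nat.mod_lt _ (by norm_num)
  have hq := Nat.div_add_mod w 16777216
  have hsplit : (-((w : Int) + 1))
      = ((16777216 - 1 - w % 16777216 : Nat) : Int) + 16777216 * (-(w / 16777216 : Nat) - 1) := by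
    push_cast
    omega
  rw [hsplit, Int.add_mul_emod_self_left]
  exact Int.emod_eq_of_lt (by push_cast; omega) (by push_cast; omega)

theorem pvNatEmod (w : Nat) : ((w : Int)) % 16777216 = ((w % 16777216 : Nat) : Int) := by
  push_cast
  rfl

-- Python xor followed by % 2^24, reduced to Nat xor of the operands' residues
theorem pvEmodBxor (x y : Int) :
    PySem.Int.bxor x y % 16777216
      = (((x % 16777216).toNat ^^^ (y % 16777216).toNat : Nat) : Int) := by
  by_cases hx : 0 ≤ x <;> by_cases hy : 0 ≤ y
  · obtain ⟨a, rfl⟩ : ∃ a : Nat, x = (a : Int) := ⟨x.toNat, by omega⟩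
    obtain ⟨b, rfl⟩ : ∃ b : Nat, y = (b : Int) := ⟨y.toNat, by omega⟩
    rw [PySem.Int.bxor_natCast, pvNatEmod, pvNatEmod, pvNatEmod,
      Int.toNat_natCast, Int.toNat_natCast, pvXorModP]
  · obtain ⟨a, rfl⟩ : ∃ a : Nat, x = (a : Int) := ⟨x.toNat, by omega⟩
    obtain ⟨b, rfl⟩ : ∃ b : Nat, y = -((b : Int) + 1) := ⟨(-y - 1).toNat, by omega⟩
    have hbx : PySem.Int.bxor (a : Int) (-((b : Int) + 1)) = -(((a ^^^ b : Nat) : Int) + 1) := by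
      unfold PySem.Int.bxor
      rw [if_pos (by positivity), if_neg (by omega)]
      rw [show (-(-((b : Int) + 1)) - 1) = ((b : Int)) by ring, Int.toNat_natCast,
        Int.toNat_natCast]
      ring
    rw [hbx, pvNegEmod, pvNatEmod, Int.toNat_natCast, pvNegEmod, Int.toNat_natCast,
      pvMaskEq, pvMaskEq, pvXorModP]
    exact_mod_cast congrArg (fun z : Nat => (z : Int)) (pvXorAC2 (16777216 - 1) _ _)
  · obtain ⟨a, rfl⟩ : ∃ a : Nat, x = -((a : Int) + 1) := ⟨(-x - 1).toNat, by omega⟩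
    obtain ⟨b, rfl⟩ : ∃ b : Nat, y = (b : Int) := ⟨y.toNat, by omega⟩
    have hbx : PySem.Int.bxor (-((a : Int) + 1)) (b : Int) = -(((a ^^^ b : Nat) : Int) + 1) := by
      unfold PySem.Int.bxor
      rw [if_neg (by omega), if_pos (by positivity)]
      rw [show (-(-((a : Int) + 1)) - 1) = ((a : Int)) by ring, Int.toNat_natCast,
        Int.toNat_natCast]
      ring
    rw [hbx, pvNegEmod, pvNegEmod, Int.toNat_natCast, pvNatEmod, Int.toNat_natCast,
      pvMaskEq, pvMaskEq, pvXorModP]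
    exact_mod_cast congrArg (fun z : Nat => (z : Int)) (Nat.xor_assoc _ _ _).symm
  · obtain ⟨a, rfl⟩ : ∃ a : Nat, x = -((a : Int) + 1) := ⟨(-x - 1).toNat, by omega⟩
    obtain ⟨b, rfl⟩ : ∃ b : Nat, y = -((b : Int) + 1) := ⟨(-y - 1).toNat, by omega⟩
    have hbx : PySem.Int.bxor (-((a : Int) + 1)) (-((b : Int) + 1)) = ((a ^^^ b : Nat) : Int) := by
      unfold PySem.Int.bxor
      rw [if_neg (by omega), if_neg (by omega)]
      rw [show (-(-((a : Int) + 1)) - 1) = ((a : Int)) by ring,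
        show (-(-((b : Int) + 1)) - 1) = ((b : Int)) by ring, Int.toNat_natCast,
        Int.toNat_natCast]
    rw [hbx, pvNatEmod, pvNegEmod, pvNegEmod, Int.toNat_natCast, Int.toNat_natCast,
      pvMaskEq, pvMaskEq, pvXorModP]
    exact_mod_cast congrArg (fun z : Nat => (z : Int)) (pvXorAC (16777216 - 1) _ _).symm

-- one loop iteration of A equals one Nat step on the 24-bit residue
theorem pvStepI_eq (m : Int) :
    pvStepI m = ((pvStepN ((PySem.Int.mod m 16777216).toNat) : Nat) : Int) := by
  set r := (PySem.Int.mod m 16777216).toNat with hrdef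
  have hrcast : PySem.Int.mod m 16777216 = ((r : Nat) : Int) := by
    rw [hrdef, pvModEmod]
    have := Int.emod_nonneg m (show (16777216 : Int) ≠ 0 by norm_num)
    omega
  have hrlt : r < 16777216 := by
    rw [hrdef, pvModEmod]
    have h1 := Int.emod_nonneg m (show (16777216 : Int) ≠ 0 by norm_num)
    have h2 := Int.emod_lt_of_pos m (show (0 : Int) < 16777216 by norm_num)
    omega
  have h1 : PySem.Int.mod (PySem.Int.bxor m (m * 64)) 16777216
      = (((r ^^^ r * 64) % 16777216 : Nat) : Int) := by
    rw [pvModEmod, pvEmodBxor]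
    have hm : (m % 16777216).toNat = r := by rw [hrdef, pvModEmod]
    have hm64 : ((m * 64) % 16777216).toNat = r * 64 % 16777216 := by
      have h64 : (m * 64) % 16777216 = (((r * 64) % 16777216 : Nat) : Int) := by
        rw [Int.mul_emod, show m % 16777216 = ((r : Nat) : Int) from (pvModEmod m).symm.trans hrcast,
          show (64 : Int) % 16777216 = ((64 : Nat) : Int) by norm_num, ← Nat.cast_mul, pvNatEmod]
      rw [h64, Int.toNat_natCast]
    rw [hm, hm64, pvXorModP, Nat.mod_eq_of_lt hrlt]
  have ha : ∀ a : Nat, PySem.Int.mod (PySem.Int.bxor ((a : Nat) : Int)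
      (PySem.Int.floordiv ((a : Nat) : Int) 32)) 16777216
      = (((a ^^^ a / 32) % 16777216 : Nat) : Int) := by
    intro a
    have hfd : PySem.Int.floordiv ((a : Nat) : Int) 32 = ((a / 32 : Nat) : Int) := by
      exact_mod_cast PySem.Int.floordiv_natCast a 32
    rw [hfd, PySem.Int.bxor_natCast, pvModEmod, pvNatEmod]
  have hb : ∀ b : Nat, PySem.Int.mod (PySem.Int.bxor ((b : Nat) : Int)
      (((b : Nat) : Int) * 2048)) 16777216
      = (((b ^^^ b * 2048) % 16777216 : Nat) : Int) := by
    intro b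
    rw [show ((b : Nat) : Int) * 2048 = ((b * 2048 : Nat) : Int) by push_cast; ring,
      PySem.Int.bxor_natCast, pvModEmod, pvNatEmod]
  show PySem.Int.mod (PySem.Int.bxor
      (PySem.Int.mod (PySem.Int.bxor
        (PySem.Int.mod (PySem.Int.bxor m (m * 64)) 16777216)
        (PySem.Int.floordiv (PySem.Int.mod (PySem.Int.bxor m (m * 64)) 16777216) 32)) 16777216)
      ((PySem.Int.mod (PySem.Int.bxor
        (PySem.Int.mod (PySem.Int.bxor m (m * 64)) 16777216)
        (PySem.Int.floordiv (PySem.Int.mod (PySem.Int.bxor m (m * 64)) 16777216) 32)) 16777216) * 2048)) 16777216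
      = ((pvStepN r : Nat) : Int)
  rw [h1, ha, hb]
  rfl

theorem pvFoldlConst (l : List Int) (f : Int → Int) (s : Int) :
    l.foldl (fun a _ => f a) s = f^[l.length] s := by
  induction l generalizing s with
  | nil => rfl
  | cons c cs ih => simp [List.foldl, ih, Function.iterate_succ_apply]

theorem pvStepI_iter (k : Nat) : ∀ m : Int,
    pvStepI^[k + 1] m = ((pvStepN^[k + 1] ((PySem.Int.mod m 16777216).toNat) : Nat) : Int) := by
  induction k with
  | zero => intro m; simpa using pvStepI_eq m
  | succ k ih =>
    intro m
    have hL : pvStepI^[k + 1 + 1] m = pvStepI^[k + 1] (pvStepI m) :=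
      Function.iterate_succ_apply pvStepI (k + 1) m
    have hR : pvStepN^[k + 1 + 1] ((PySem.Int.mod m 16777216).toNat)
        = pvStepN^[k + 1] (pvStepN ((PySem.Int.mod m 16777216).toNat)) :=
      Function.iterate_succ_apply pvStepN (k + 1) _
    rw [hL, hR, pvStepI_eq m, ih]
    congr 2
    rw [pvModEmod, pvNatEmod, Int.toNat_natCast, Nat.mod_eq_of_lt (pvStepN_lt _)]

-- ===== VERDICT (by name: the statement is the Claim_ definition above) =====
theorem evolve_secret_number_spec : Claim_equal_evolve_secret_number := by
  intro n turn_count _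
  unfold Spec_evolve_secret_number evolve_secret_number evolve_secret_number_alt
  by_cases h : turn_count ≤ 0
  · rw [PySem.List.pyRange_one_eq_nil h, if_pos h]
    rfl
  · rw [if_neg h]
    have hbody : (fun (n : Int) (_ : Int) =>
        let n1 := PySem.Int.mod (PySem.Int.bxor n (n * 64)) 16777216
        let n2 := PySem.Int.mod (PySem.Int.bxor n1 (PySem.Int.floordiv n1 32)) 16777216
        PySem.Int.mod (PySem.Int.bxor n2 (n2 * 2048)) 16777216)
        = fun (a : Int) (_ : Int) => pvStepI a := rfl
    rw [hbody, pvFoldlConst, PySem.List.length_pyRange_one]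
    have hk : (turn_count - 0).toNat = (turn_count.toNat - 1) + 1 := by omega
    rw [hk, pvStepI_iter]
    have hvlt : (PySem.Int.mod n 16777216).toNat < 16777216 := by
      rw [pvModEmod]
      have h1 := Int.emod_nonneg n (show (16777216 : Int) ≠ 0 by norm_num)
      have h2 := Int.emod_lt_of_pos n (show (0 : Int) < 16777216 by norm_num)
      omega
    have hfin : ((pvApply (pvPowLoop ((List.range 24).map (fun j => pvStepN (1 <<< j)))
        ((List.range 24).map (fun j => 1 <<< j)) turn_count.toNat)
        ((PySem.Int.mod n 16777216).toNat) : Nat) : Int)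
        = ((pvStepN^[turn_count.toNat] ((PySem.Int.mod n 16777216).toNat) : Nat) : Int) := by
      rw [pvAlt_sem _ _ hvlt]
    rw [show (turn_count.toNat - 1) + 1 = turn_count.toNat by omega]
    exact hfin.symm
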